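-- pv_equiv track=rewrite | github.com/MrBrantCode/unitest_baseline | mut_generate/mist_train_cf/cf_86833/solution.py | generate_class_list
-- ===== SOURCE A (Python) =====
-- def generate_class_list(class_names):
--     # Remove leading and trailing whitespaces from each name
--     class_names = [name.strip() for name in class_names]
--
--     # Remove any names with whitespace within them
--     class_names = [name for name in class_names if ' ' not in name]
--
--     # Convert all names to lowercase to handle case sensitivity
--     class_names = [name.lower() for name in class_names]
--
--     # Remove any duplicate names
--     class_names = list(set(class_names))
--
--     # Sort the names in alphabetical order
--     class_names.sort()
--
--     # Ensure the class list does not exceed a length of 10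
--     class_names = class_names[:10]
--
--     return class_names
-- ===== SOURCE B (Python) =====
-- def _ins(best, s):
--     # ordered insert into a sorted duplicate-free buffer; no-op if s already present
--     if not best:
--         return [s]
--     if s == best[0]:
--         return best
--     if s < best[0]:
--         return [s] + best
--     return [best[0]] + _ins(best[1:], s)
--
-- def generate_class_list(class_names):
--     # Single pass: maintain a bounded (<=10) sorted duplicate-free buffer of the
--     # smallest cleaned names; no set, no sort, no final slice.
--     best = []
--     for name in class_names:
--         s = name.strip()
--         if ' ' in s:
--             continue
--         best = _ins(best, s.lower())[:10]
--     return best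
-- ===== Notes on version B (the rewrite author's own statement) =====
-- stated objective: alternative
-- what changed: Replaces A's staged pipeline (set-dedupe, full sort, slice) with a single pass over the input that maintains a bounded sorted duplicate-free buffer of the 10 smallest cleaned names via ordered insertion, so no set, no sort call and no final slice are used.
import Mathlib
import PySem

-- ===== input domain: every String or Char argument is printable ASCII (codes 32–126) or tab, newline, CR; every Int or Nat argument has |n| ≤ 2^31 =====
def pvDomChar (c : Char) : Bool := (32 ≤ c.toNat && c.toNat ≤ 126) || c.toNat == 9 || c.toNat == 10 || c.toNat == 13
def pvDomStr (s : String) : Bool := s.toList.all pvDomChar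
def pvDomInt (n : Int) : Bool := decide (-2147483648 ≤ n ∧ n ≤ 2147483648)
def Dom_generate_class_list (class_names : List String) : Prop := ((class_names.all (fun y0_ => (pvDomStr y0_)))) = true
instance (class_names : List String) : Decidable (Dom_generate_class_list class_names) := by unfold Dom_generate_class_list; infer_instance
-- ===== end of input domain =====

-- B replaces A's staged set-dedupe + full sort + slice with one pass keeping a bounded (≤10)
-- sorted duplicate-free buffer via ordered insertion (alternative decomposition).

-- ===== PORT A =====
def generate_class_list (class_names : List String) : List String :=
  let cn1 := class_names.map (fun name => PySem.Str.strip name)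
  let cn2 := cn1.filter (fun name => !(PySem.Str.isIn " " name))
  let cn3 := cn2.map (fun name => PySem.Str.lower name)
  let cn4 := PySem.Set.ofList cn3
  let cn5 := PySem.List.sorted cn4 (fun x => x) false
  PySem.List.slice cn5 none (some 10)

-- ===== PORT B =====
-- ordered insert into a sorted duplicate-free buffer; no-op if s already present
def pvIns (best : List String) (s : String) : List String :=
  match best with
  | [] => [s]
  | h :: t =>
      if s = h then h :: t
      else if s < h then s :: h :: t
      else h :: pvIns t s

def generate_class_list_alt (class_names : List String) : List String :=
  class_names.foldl (fun best name =>
    let s := PySem.Str.strip name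
    if PySem.Str.isIn " " s then best
    else (pvIns best (PySem.Str.lower s)).take 10) []   -- `[:10]` with a nonneg literal = take 10

-- ===== PRECONDITION & SPEC =====
def Spec_generate_class_list (class_names : List String) (out : List String) : Prop := out = generate_class_list_alt class_names
instance (class_names : List String) (out : List String) : Decidable (Spec_generate_class_list class_names out) := by unfold Spec_generate_class_list; infer_instance

-- ===== CLAIM (what is proved, stated in full; the proofs are below) =====
def Claim_equal_generate_class_list : Prop := ∀ (class_names : List String), Dom_generate_class_list class_names → Spec_generate_class_list class_names (generate_class_list class_names)

-- ===== LEMMAS AND PROOFS =====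

-- proof-side name for A's sorted deduped list of ys
def pvSD (ys : List String) : List String :=
  PySem.List.sorted (PySem.Set.ofList ys) (fun x => x) false

theorem mem_pvIns (L : List String) (s x : String) :
    x ∈ pvIns L s ↔ x ∈ L ∨ x = s := by
  induction L with
  | nil => simp [pvIns]
  | cons h t ih =>
      by_cases h1 : s = h
      · subst h1; simp [pvIns]; tauto
      · by_cases h2 : s < h
        · simp [pvIns, h1, h2]; tauto
        · simp [pvIns, h1, h2, ih]; tauto

theorem pairwise_pvIns (L : List String) (s : String) (hL : L.Pairwise (· < ·)) :
    (pvIns L s).Pairwise (· < ·) := by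
  induction L with
  | nil => simp [pvIns]
  | cons h t ih =>
      have hh := (List.pairwise_cons.mp hL).1
      have ht := (List.pairwise_cons.mp hL).2
      by_cases h1 : s = h
      · simpa [pvIns, h1] using hL
      · by_cases h2 : s < h
        · rw [show pvIns (h :: t) s = s :: h :: t from by simp [pvIns, h1, h2]]
          refine List.pairwise_cons.mpr ⟨?_, hL⟩
          intro y hy
          rcases List.mem_cons.mp hy with rfl | hy'
          · exact h2
          · exact lt_trans h2 (hh y hy')
        · have hhs : h < s := lt_of_le_of_ne (not_lt.mp h2) (fun hc => h1 hc.symm)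
          rw [show pvIns (h :: t) s = h :: pvIns t s from by simp [pvIns, h1, h2]]
          refine List.pairwise_cons.mpr ⟨?_, ih ht⟩
          intro y hy
          rcases (mem_pvIns t s y).mp hy with hy' | rfl
          · exact hh y hy'
          · exact hhs

theorem pvSD_append (ys : List String) (s : String) :
    pvSD (ys ++ [s]) = pvIns (pvSD ys) s := by
  have hSD : (pvSD ys).Pairwise (· < ·) := by
    have hle : (pvSD ys).Pairwise (· ≤ ·) :=
      PySem.List.sorted_pairwise (PySem.Set.ofList ys) (fun x => x)
    have hnd : (pvSD ys).Nodup :=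
      (PySem.List.sorted_perm (PySem.Set.ofList ys) (fun x => x) false).nodup_iff.mpr
        (PySem.Set.nodup_ofList ys)
    exact hle.imp₂ (fun a b hab hne => lt_of_le_of_ne hab hne) hnd
  have hpw : (pvIns (pvSD ys) s).Pairwise (· < ·) := pairwise_pvIns _ _ hSD
  have hnd : (pvIns (pvSD ys) s).Nodup := hpw.imp ne_of_lt
  have hperm : (pvIns (pvSD ys) s).Perm (PySem.Set.ofList (ys ++ [s])) := by
    rw [List.perm_ext_iff_of_nodup hnd (PySem.Set.nodup_ofList _)]
    intro x
    rw [mem_pvIns]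
    simp [pvSD, PySem.List.mem_sorted, PySem.Set.mem_ofList]
  exact PySem.List.sorted_eq_of_perm_of_pairwise_lt _ _ _ hperm hpw

-- truncation to k commutes with bounded insertion (unconditional)
theorem take_pvIns_take (s : String) :
    ∀ (L : List String) (k : Nat), (pvIns (L.take k) s).take k = (pvIns L s).take k := by
  intro L
  induction L with
  | nil => intro k; simp
  | cons h t ih =>
      intro k
      cases k with
      | zero => simp
      | succ k' =>
          by_cases h1 : s = h
          · simp [pvIns, h1]
          · by_cases h2 : s < h
            · cases k' with
              | zero => simp [pvIns, h1, h2]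
              | succ m =>
                  simp [pvIns, h1, h2, List.take_take]
            · simp [pvIns, h1, h2, ih]

-- the loop invariant: B's fold over ys equals take 10 of A's sorted deduped set of ys
theorem fold_eq_take_pvSD (ys : List String) :
    ys.foldl (fun best s => (pvIns best s).take 10) [] = (pvSD ys).take 10 := by
  induction ys using List.reverseRecOn with
  | nil => rfl
  | append_singleton ys s ih =>
      rw [List.foldl_append, List.foldl_cons, List.foldl_nil, ih,
        pvSD_append, take_pvIns_take]

-- fusing B's inline clean-and-fold with A's staged cleaning pipeline
theorem fold_clean_fuse (ys : List String) : ∀ (b : List String),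
    ys.foldl (fun best name =>
      let s := PySem.Str.strip name
      if PySem.Str.isIn " " s then best
      else (pvIns best (PySem.Str.lower s)).take 10) b
    = ((ys.filter (fun name => !(PySem.Str.isIn " " (PySem.Str.strip name)))).map
        (fun name => PySem.Str.lower (PySem.Str.strip name))).foldl
        (fun best s => (pvIns best s).take 10) b := by
  induction ys with
  | nil => intro b; rfl
  | cons y t ih =>
      intro b
      by_cases hy : PySem.Chars.isIn [' '] (PySem.Chars.strip y.toList) = true
      · simp [List.foldl_cons, hy]
        simpa using ih b
      · simp [List.foldl_cons, hy]
        simpa using ih (List.take 10 (pvIns b (PySem.Str.lower (PySem.Str.strip y))))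

-- ===== VERDICT (by name: the statement is the Claim_ definition above) =====
theorem generate_class_list_spec : Claim_equal_generate_class_list := by
  intro class_names _
  unfold Spec_generate_class_list generate_class_list generate_class_list_alt
  simp only []
  rw [PySem.List.slice_to _ (by norm_num : (0:Int) ≤ 10)]
  have hclean :
      List.map (fun name => PySem.Str.lower name)
          (List.filter (fun name => !(PySem.Str.isIn " " name))
            (List.map (fun name => PySem.Str.strip name) class_names))
        = List.map (fun name => PySem.Str.lower (PySem.Str.strip name))
            (List.filter (fun name => !(PySem.Str.isIn " " (PySem.Str.strip name))) class_names) := by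
    rw [List.filter_map, List.map_map]; rfl
  rw [hclean, fold_clean_fuse, fold_eq_take_pvSD]
  rfl
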